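-- pv_equiv track=rewrite | github.com/bradmontgomery/ctypes_example | main.py | n_squared
-- ===== SOURCE A (Python) =====
-- def n_squared(iterations):
--     """
--     A contrived function that should run in O(n^2) time based on the
--     size of the input.
--
--     """
--     result = 0
--     i = 0
--
--     # n-squared
--     while i < iterations:
--         j = 0
--         while j < iterations:
--             result += i + j
--             j += 1
--         i += 1
--     return result
-- ===== SOURCE B (Python) =====
-- def n_squared(iterations):
--     """Closed-form: sum over 0<=i,j<n of (i+j) equals n^2*(n-1); 0 for n<=0."""
--     if iterations <= 0:
--         return 0
--     return iterations * iterations * (iterations - 1)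
-- ===== Notes on version B (the rewrite author's own statement) =====
-- stated objective: faster
-- what changed: Replaced the nested while loops with the closed-form n^2*(n-1) (0 for n<=0).
import Mathlib
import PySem

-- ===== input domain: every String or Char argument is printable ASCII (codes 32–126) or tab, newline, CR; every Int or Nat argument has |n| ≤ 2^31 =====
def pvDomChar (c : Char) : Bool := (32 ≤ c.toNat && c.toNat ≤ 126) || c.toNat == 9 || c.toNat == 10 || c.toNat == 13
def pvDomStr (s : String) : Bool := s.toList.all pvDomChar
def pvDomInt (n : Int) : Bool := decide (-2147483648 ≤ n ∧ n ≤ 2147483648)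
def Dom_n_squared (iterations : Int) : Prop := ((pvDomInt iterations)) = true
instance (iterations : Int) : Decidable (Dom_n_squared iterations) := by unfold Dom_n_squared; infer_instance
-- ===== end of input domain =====

-- B replaces A's nested while loops with the closed form n^2*(n-1) (0 for n ≤ 0): O(1) instead of O(n^2).


-- ===== PORT A =====
-- inner while loop: `while j < iterations: result += i + j; j += 1`
def nSquaredInner (iterations i j result : Int) : Int :=
  if j < iterations then nSquaredInner iterations i (j + 1) (result + (i + j)) else result
termination_by (iterations - j).toNat
decreasing_by omega

-- outer while loop: `while i < iterations: <inner>; i += 1`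
def nSquaredOuter (iterations i result : Int) : Int :=
  if i < iterations then nSquaredOuter iterations (i + 1) (nSquaredInner iterations i 0 result) else result
termination_by (iterations - i).toNat
decreasing_by omega

def n_squared (iterations : Int) : Int := nSquaredOuter iterations 0 0

-- ===== PORT B =====
def n_squared_alt (iterations : Int) : Int :=
  if iterations ≤ 0 then 0 else iterations * iterations * (iterations - 1)

-- ===== PRECONDITION & SPEC =====
def Spec_n_squared (iterations : Int) (out : Int) : Prop := out = n_squared_alt iterations
instance (iterations : Int) (out : Int) : Decidable (Spec_n_squared iterations out) := by unfold Spec_n_squared; infer_instance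

-- ===== CLAIM (what is proved, stated in full; the proofs are below) =====
def Claim_equal_n_squared : Prop := ∀ (iterations : Int), Dom_n_squared iterations → Spec_n_squared iterations (n_squared iterations)

-- ===== LEMMAS AND PROOFS =====

-- invariant of the inner loop, doubled to avoid division
theorem nSquaredInner_two (n i : Int) :
    ∀ (k : Nat) (j r : Int), (n - j).toNat = k → j ≤ n →
      2 * nSquaredInner n i j r = 2 * r + (n - j) * (2 * i + j + n - 1) := by
  intro k
  induction k with
  | zero =>
    intro j r hk hj
    have hjn : j = n := by omega
    unfold nSquaredInner
    rw [if_neg (by omega)]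
    subst hjn; ring
  | succ k ih =>
    intro j r hk hj
    have hlt : j < n := by omega
    unfold nSquaredInner
    rw [if_pos hlt]
    rw [ih (j + 1) (r + (i + j)) (by omega) (by omega)]
    ring

-- invariant of the outer loop
theorem nSquaredOuter_two (n : Int) :
    ∀ (k : Nat) (i r : Int), (n - i).toNat = k → 0 ≤ i → i ≤ n →
      2 * nSquaredOuter n i r = 2 * r + n * (n - i) * (i + 2 * n - 2) := by
  intro k
  induction k with
  | zero =>
    intro i r hk hi0 hi
    have hin : i = n := by omega
    unfold nSquaredOuter
    rw [if_neg (by omega)]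
    subst hin; ring
  | succ k ih =>
    intro i r hk hi0 hi
    have hlt : i < n := by omega
    unfold nSquaredOuter
    rw [if_pos hlt]
    rw [ih (i + 1) (nSquaredInner n i 0 r) (by omega) (by omega) (by omega)]
    have hin := nSquaredInner_two n i (n - 0).toNat 0 r rfl (by omega)
    nlinarith [hin]

theorem nSquaredOuter_nonpos (n i r : Int) (h : n ≤ i) : nSquaredOuter n i r = r := by
  rw [nSquaredOuter, if_neg (not_lt.mpr h)]

-- ===== VERDICT (by name: the statement is the Claim_ definition above) =====
theorem n_squared_spec : Claim_equal_n_squared := by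
  intro n _
  unfold Spec_n_squared n_squared n_squared_alt
  by_cases h : n ≤ 0
  · rw [if_pos h, nSquaredOuter_nonpos n 0 0 h]
  · rw [if_neg h]
    have := nSquaredOuter_two n (n - 0).toNat 0 0 rfl (by omega) (by omega)
    nlinarith [this]
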